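-- pv_equiv track=rewrite | github.com/VoltusV5/AI-Gym-Coach | scripts/fetch_exercise_media.py | get_exercise_gif_url
-- ===== SOURCE A (Python) =====
-- def get_exercise_gif_url(info: dict) -> str | None:
--     """Extract the first animated GIF url from wger exerciseinfo response."""
--     images = info.get("images", []) or []
--     for img in images:
--         img_url = img.get("image", "")
--         if img_url.lower().endswith(".gif"):
--             return img_url
--     for img in images:
--         img_url = img.get("image", "")
--         if img_url:
--             return img_url
--     return None
-- ===== SOURCE B (Python) =====
-- def get_exercise_gif_url(info: dict) -> str | None:
--     """Rank-and-select: collect (rank, index) candidates over the urls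
--     (rank 0 = gif, rank 1 = other non-empty) and take the lexicographic
--     minimum; gifs beat everything, ties break to the earliest index."""
--     urls = [img.get("image", "") for img in info.get("images", []) or []]
--     ranked = [((0 if u.lower().endswith(".gif") else 1), i)
--               for i, u in enumerate(urls) if u]
--     if not ranked:
--         return None
--     return urls[min(ranked)[1]]
-- ===== Notes on version B (the rewrite author's own statement) =====
-- stated objective: alternative
-- what changed: Replaced A's two sequential early-return scans by a rank-and-select algorithm: build (rank, index) candidates (rank 0 for gifs, 1 for other non-empty urls) and return the url at the lexicographic minimum.
import Mathlib
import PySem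

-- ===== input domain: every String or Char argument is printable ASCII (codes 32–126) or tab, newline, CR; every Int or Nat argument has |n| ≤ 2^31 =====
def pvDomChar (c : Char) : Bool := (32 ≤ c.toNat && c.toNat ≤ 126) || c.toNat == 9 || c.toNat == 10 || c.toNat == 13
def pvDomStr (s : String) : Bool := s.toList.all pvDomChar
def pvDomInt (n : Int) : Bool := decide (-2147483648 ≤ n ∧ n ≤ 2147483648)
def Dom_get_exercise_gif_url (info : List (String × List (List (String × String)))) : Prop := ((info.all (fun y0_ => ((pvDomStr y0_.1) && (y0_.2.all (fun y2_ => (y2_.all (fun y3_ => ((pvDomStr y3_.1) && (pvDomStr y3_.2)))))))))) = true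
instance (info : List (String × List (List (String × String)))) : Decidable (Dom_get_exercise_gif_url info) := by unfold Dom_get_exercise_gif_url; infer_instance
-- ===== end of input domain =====

-- B replaces A's two sequential scans by rank-and-select: lexicographic min over (rank, index) candidates (objective: alternative).

-- ===== PORT A =====
-- first Python loop: return the first url whose lowercase ends with ".gif"
def pvLoopGif : List (List (String × String)) → Option String
  | [] => none
  | img :: rest =>
    let img_url := PySem.Dict.getD (PySem.Dict.mk img) "image" ""
    if PySem.Str.endswith (PySem.Str.lower img_url) ".gif" then some img_url
    else pvLoopGif rest

-- second Python loop: return the first non-empty url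
def pvLoopAny : List (List (String × String)) → Option String
  | [] => none
  | img :: rest =>
    let img_url := PySem.Dict.getD (PySem.Dict.mk img) "image" ""
    if img_url ≠ "" then some img_url
    else pvLoopAny rest

def get_exercise_gif_url (info : List (String × List (List (String × String)))) : Option String :=
  -- images = info.get("images", []) or []   ('or []' is the identity on lists: [] or [] = [])
  let images := PySem.Dict.getD (PySem.Dict.mk info) "images" []
  match pvLoopGif images with
  | some u => some u
  | none => pvLoopAny images

-- ===== PORT B =====
-- urls = [img.get("image", "") for img in images]
def pvUrls (images : List (List (String × String))) : List String :=
  images.map (fun img => PySem.Dict.getD (PySem.Dict.mk img) "image" "")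

-- u.lower().endswith(".gif")
def pvGif (u : String) : Bool := PySem.Str.endswith (PySem.Str.lower u) ".gif"

-- ranked = [((0 if u.lower().endswith(".gif") else 1), i) for i, u in enumerate(urls) if u]
def pvRanked (urls : List String) : List (Int × Int) :=
  ((PySem.List.enumerate urls).filter (fun p => decide (p.2 ≠ ""))).map
    (fun p => ((if pvGif p.2 then (0 : Int) else 1), p.1))

def get_exercise_gif_url_alt (info : List (String × List (List (String × String)))) : Option String :=
  let urls := pvUrls (PySem.Dict.getD (PySem.Dict.mk info) "images" [])
  -- min(ranked) on int pairs = PySem.List.min2? with the two components as keys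
  match PySem.List.min2? (pvRanked urls) Prod.fst Prod.snd with
  | none => none                                    -- if not ranked: return None
  | some m => PySem.List.pyGet? urls m.2            -- return urls[min(ranked)[1]] (index always in range)

-- ===== PRECONDITION & SPEC =====
-- A is total and B matches it on every input, so Pre_ excludes NOTHING (it holds trivially,
-- by reflexivity): it is stated only to name the vocabulary A reads (the "images"/"image" keys)
-- and to pin one representative witness input.
def Pre_get_exercise_gif_url (info : List (String × List (List (String × String)))) : Prop :=
  ∀ p ∈ info, p.1 = "images" → ∀ d ∈ p.2, ∀ q ∈ d, q.1 = "image" → q.1 = "image"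
instance (info : List (String × List (List (String × String)))) : Decidable (Pre_get_exercise_gif_url info) := by unfold Pre_get_exercise_gif_url; infer_instance

def pvWitness_get_exercise_gif_url : (List (String × List (List (String × String)))) :=
  [("images", [[("image", "")], [("license", "cc")], [("image", "arm-curl.png")],
               [("image", "Run.GIF")], [("image", "row.gif")]]),
   ("name", [])]

def Spec_get_exercise_gif_url (info : List (String × List (List (String × String)))) (out : Option String) : Prop := out = get_exercise_gif_url_alt info
instance (info : List (String × List (List (String × String)))) (out : Option String) : Decidable (Spec_get_exercise_gif_url info out) := by unfold Spec_get_exercise_gif_url; infer_instance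

-- ===== CLAIM =====
def Claim_equal_get_exercise_gif_url : Prop := ∀ (info : List (String × List (List (String × String)))), Dom_get_exercise_gif_url info → Pre_get_exercise_gif_url info → Spec_get_exercise_gif_url info (get_exercise_gif_url info)

-- ===== LEMMAS AND PROOFS =====

-- A's loops are find? over the mapped url list
theorem pvLoopGif_eq_find (images : List (List (String × String))) :
    pvLoopGif images = (pvUrls images).find? pvGif := by
  induction images with
  | nil => rfl
  | cons img rest ih =>
    rw [show pvLoopGif (img :: rest) =
          (if pvGif (PySem.Dict.getD (PySem.Dict.mk img) "image" "") then
             some (PySem.Dict.getD (PySem.Dict.mk img) "image" "")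
           else pvLoopGif rest) from rfl,
        show pvUrls (img :: rest) =
          PySem.Dict.getD (PySem.Dict.mk img) "image" "" :: pvUrls rest from rfl,
        List.find?_cons]
    cases h : pvGif (PySem.Dict.getD (PySem.Dict.mk img) "image" "") <;> simp [ih]

theorem pvLoopAny_eq_find (images : List (List (String × String))) :
    pvLoopAny images = (pvUrls images).find? (fun u => decide (u ≠ "")) := by
  induction images with
  | nil => rfl
  | cons img rest ih =>
    rw [show pvLoopAny (img :: rest) =
          (if PySem.Dict.getD (PySem.Dict.mk img) "image" "" ≠ "" then
             some (PySem.Dict.getD (PySem.Dict.mk img) "image" "")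
           else pvLoopAny rest) from rfl,
        show pvUrls (img :: rest) =
          PySem.Dict.getD (PySem.Dict.mk img) "image" "" :: pvUrls rest from rfl,
        List.find?_cons]
    by_cases h : PySem.Dict.getD (PySem.Dict.mk img) "image" "" = "" <;> simp [h, ih]

-- find? over enumerate, projected to the value, is find? over the list
theorem find?_enumerate_map (urls : List String) (q : String → Bool) :
    ∀ s : Int, ((PySem.List.enumerate urls s).find? (fun p => q p.2)).map (·.2) = urls.find? q := by
  induction urls with
  | nil => intro s; rfl
  | cons u rest ih =>
    intro s
    rw [PySem.List.enumerate_cons, List.find?_cons, List.find?_cons]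
    cases hq : q u <;> simp [ih]

-- an enumerate pair is a valid lookup
theorem pyGet?_of_mem_enumerate (urls : List String) (p : Int × String)
    (hp : p ∈ PySem.List.enumerate urls 0) : PySem.List.pyGet? urls p.1 = some p.2 := by
  rcases (PySem.List.mem_enumerate_iff urls 0 p).1 hp with ⟨k, hk, rfl⟩
  simp [PySem.List.pyGet?_natCast, List.getElem?_eq_getElem hk]

-- min2?'s fold step, spelled out
def pvStep (acc : Option (Int × Int)) (x : Int × Int) : Option (Int × Int) :=
  match acc with
  | none => some x
  | some m =>
    if (decide (x.1 < m.1) || !decide (m.1 < x.1) && decide (x.2 < m.2)) = true then some x else some m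

theorem min2?_eq_foldl (L : List (Int × Int)) :
    PySem.List.min2? L Prod.fst Prod.snd = L.foldl pvStep none := by
  unfold PySem.List.min2?
  congr 1
  funext acc x
  cases acc <;> rfl

-- the accumulator lemma: with ranks in {0,1} and strictly increasing indices,
-- the running minimum is the held element if it is a gif, else the first gif, else the held element
theorem foldl_pvStep_char (L : List (Int × Int)) :
    ∀ m : Int × Int, (m.1 = 0 ∨ m.1 = 1) → (∀ t ∈ L, t.1 = 0 ∨ t.1 = 1) →
      (∀ t ∈ L, m.2 < t.2) → L.Pairwise (fun a b => a.2 < b.2) →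
      L.foldl pvStep (some m) =
        if m.1 = 0 then some m else
          match L.find? (fun t => t.1 == 0) with
          | some t => some t
          | none => some m := by
  induction L with
  | nil => intro m _ _ _ _; split_ifs <;> rfl
  | cons x rest ih =>
    intro m hm h0 hlt hpw
    have hx0 := h0 x (by simp)
    have hxlt := hlt x (by simp)
    rw [List.foldl_cons, List.find?_cons]
    rcases hm with hm | hm
    · -- m is a gif: x never replaces it
      have hstep : pvStep (some m) x = some m := by
        rcases hx0 with hx | hx <;>
          simp [pvStep, hm, hx, not_lt_of_gt hxlt]
      rw [hstep, ih m (Or.inl hm) (fun t ht => h0 t (by simp [ht]))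
            (fun t ht => hlt t (by simp [ht])) hpw.of_cons]
      simp [hm]
    · rcases hx0 with hx | hx
      · -- m rank 1, x rank 0: x takes over and stays
        have hstep : pvStep (some m) x = some x := by simp [pvStep, hm, hx]
        rw [hstep, ih x (Or.inl hx) (fun t ht => h0 t (by simp [ht]))
              (fun t ht => (List.pairwise_cons.1 hpw).1 t ht) hpw.of_cons]
        simp [hm, hx]
      · -- m rank 1, x rank 1: m stays (smaller index)
        have hstep : pvStep (some m) x = some m := by
          simp [pvStep, hm, hx, not_lt_of_gt hxlt]
        rw [hstep, ih m (Or.inr hm) (fun t ht => h0 t (by simp [ht]))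
              (fun t ht => hlt t (by simp [ht])) hpw.of_cons]
        simp [hm, hx]

theorem min2?_char (L : List (Int × Int)) (h0 : ∀ t ∈ L, t.1 = 0 ∨ t.1 = 1)
    (hpw : L.Pairwise (fun a b => a.2 < b.2)) :
    PySem.List.min2? L Prod.fst Prod.snd =
      match L.find? (fun t => t.1 == 0) with
      | some t => some t
      | none => L.head? := by
  rw [min2?_eq_foldl]
  cases L with
  | nil => rfl
  | cons x rest =>
    have hx0 := h0 x (by simp)
    rw [List.foldl_cons, show pvStep none x = some x from rfl, List.find?_cons,
      foldl_pvStep_char rest x hx0 (fun t ht => h0 t (by simp [ht]))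
        (fun t ht => (List.pairwise_cons.1 hpw).1 t ht) hpw.of_cons]
    rcases hx0 with hx | hx <;> simp [hx]

-- pvRanked facts
theorem pvRanked_ranks (urls : List String) : ∀ t ∈ pvRanked urls, t.1 = 0 ∨ t.1 = 1 := by
  intro t ht
  simp only [pvRanked, List.mem_map] at ht
  rcases ht with ⟨p, _, rfl⟩
  split_ifs <;> simp

theorem pvRanked_pairwise (urls : List String) : (pvRanked urls).Pairwise (fun a b => a.2 < b.2) := by
  unfold pvRanked
  refine List.pairwise_map.2 ?_
  exact (PySem.List.pairwise_lt_enumerate urls 0).sublist List.filter_sublist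

-- a gif url is non-empty
theorem pvGif_ne_empty (u : String) (h : pvGif u = true) : u ≠ "" := by
  intro h'; rw [h'] at h; exact absurd h (by decide)

theorem pvRanked_find? (urls : List String) :
    (pvRanked urls).find? (fun t => t.1 == 0) =
      ((PySem.List.enumerate urls).find? (fun p => pvGif p.2)).map
        (fun p => ((if pvGif p.2 then (0 : Int) else 1), p.1)) := by
  unfold pvRanked
  rw [List.find?_map]
  have h1 : ((fun t : Int × Int => t.1 == 0) ∘ fun p : Int × String =>
      ((if pvGif p.2 then (0 : Int) else 1), p.1)) = fun p => pvGif p.2 := by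
    funext p; cases h : pvGif p.2 <;> simp [h]
  rw [h1, List.find?_filter]
  have h2 : (fun a : Int × String => decide (decide (a.2 ≠ "") = true ∧ pvGif a.2 = true)) =
      fun p : Int × String => pvGif p.2 := by
    funext p
    cases h : pvGif p.2
    · simp
    · simp [pvGif_ne_empty p.2 h]
  rw [show (fun a : Int × String => decide (decide (a.2 ≠ "") = true ∧ pvGif a.2 = true)) =
      (fun p : Int × String => pvGif p.2) from h2]

theorem pvRanked_head? (urls : List String) :
    (pvRanked urls).head? =
      ((PySem.List.enumerate urls).find? (fun p => decide (p.2 ≠ ""))).map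
        (fun p => ((if pvGif p.2 then (0 : Int) else 1), p.1)) := by
  unfold pvRanked
  rw [List.head?_map, List.head?_filter]

-- the core equivalence, over the shared url list
theorem core_eq (urls : List String) :
    (match PySem.List.min2? (pvRanked urls) Prod.fst Prod.snd with
      | none => none
      | some m => PySem.List.pyGet? urls m.2) =
      match urls.find? pvGif with
      | some u => some u
      | none => urls.find? (fun u => decide (u ≠ "")) := by
  rw [min2?_char (pvRanked urls) (pvRanked_ranks urls) (pvRanked_pairwise urls),
    pvRanked_find?, pvRanked_head?]
  cases hg : (PySem.List.enumerate urls).find? (fun p => pvGif p.2) with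
  | some p =>
    have hmem : p ∈ PySem.List.enumerate urls 0 := List.mem_of_find?_eq_some hg
    have hA := find?_enumerate_map urls pvGif 0
    rw [hg] at hA
    simp only [Option.map_some] at hA
    rw [← hA]
    simp [pyGet?_of_mem_enumerate urls p hmem]
  | none =>
    have hA := find?_enumerate_map urls pvGif 0
    rw [hg] at hA
    simp only [Option.map_none] at hA
    rw [← hA]
    cases hn : (PySem.List.enumerate urls).find? (fun p => decide (p.2 ≠ "")) with
    | some p =>
      have hmem : p ∈ PySem.List.enumerate urls 0 := List.mem_of_find?_eq_some hn
      have hB := find?_enumerate_map urls (fun u => decide (u ≠ "")) 0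
      rw [hn] at hB
      simp only [Option.map_some] at hB
      rw [← hB]
      simp [pyGet?_of_mem_enumerate urls p hmem]
    | none =>
      have hB := find?_enumerate_map urls (fun u => decide (u ≠ "")) 0
      rw [hn] at hB
      simp only [Option.map_none] at hB
      rw [← hB]
      rfl

-- ===== VERDICT =====
theorem get_exercise_gif_url_spec : Claim_equal_get_exercise_gif_url := by
  intro info _ _
  show (match pvLoopGif (PySem.Dict.getD (PySem.Dict.mk info) "images" []) with
        | some u => some u
        | none => pvLoopAny (PySem.Dict.getD (PySem.Dict.mk info) "images" [])) =
      (match PySem.List.min2?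
          (pvRanked (pvUrls (PySem.Dict.getD (PySem.Dict.mk info) "images" []))) Prod.fst Prod.snd with
        | none => none
        | some m => PySem.List.pyGet? (pvUrls (PySem.Dict.getD (PySem.Dict.mk info) "images" [])) m.2)
  rw [pvLoopGif_eq_find, pvLoopAny_eq_find, core_eq]
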